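-- pv_equiv track=rewrite | github.com/zjc0418/FoG-M3 | train.py | is_within_valid_range
-- ===== SOURCE A (Python) =====
-- def is_within_valid_range(valid_indices, target_idx):
--     if not valid_indices:
--         return False
--
--     closest_indices = sorted(valid_indices, key=lambda x: abs(x - target_idx))
--
--     if len(closest_indices) < 2:
--         return False
--
--     for idx in closest_indices[:2]:
--         if abs(idx - target_idx) <= 576 or abs(idx - target_idx) <= 64:
--             return True
--
--     return False
-- ===== SOURCE B (Python) =====
-- def is_within_valid_range(valid_indices, target_idx):
--     if len(valid_indices) < 2:
--         return False
--     return any(abs(idx - target_idx) <= 576 for idx in valid_indices)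
-- ===== Notes on version B (the rewrite author's own statement) =====
-- stated objective: faster
-- what changed: Replaces sorting the whole list by distance and probing the two positional neighbors with a single unordered O(n) existence scan (any element within 576), keeping only the len<2 guard; the redundant <=64 disjunct is dropped.
import Mathlib
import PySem

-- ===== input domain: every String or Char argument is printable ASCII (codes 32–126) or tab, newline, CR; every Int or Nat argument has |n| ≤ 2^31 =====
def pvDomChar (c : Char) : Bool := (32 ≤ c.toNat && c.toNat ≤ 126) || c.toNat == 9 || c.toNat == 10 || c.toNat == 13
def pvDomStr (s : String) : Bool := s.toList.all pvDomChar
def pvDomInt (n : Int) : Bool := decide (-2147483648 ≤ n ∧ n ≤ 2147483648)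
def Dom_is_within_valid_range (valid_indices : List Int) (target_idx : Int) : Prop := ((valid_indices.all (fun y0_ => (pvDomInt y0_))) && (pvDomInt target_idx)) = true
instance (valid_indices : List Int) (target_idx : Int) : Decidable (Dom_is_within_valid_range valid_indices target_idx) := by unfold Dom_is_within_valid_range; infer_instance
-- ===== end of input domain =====

-- B replaces the sort-by-distance-and-probe-two-neighbors with a single unordered existence scan (simpler, same results).


-- ===== PORT A =====
def is_within_valid_range (valid_indices : List Int) (target_idx : Int) : Bool :=
  if valid_indices = [] then false
  else
    let closest_indices := PySem.List.sorted valid_indices (fun x => |x - target_idx|) false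
    if closest_indices.length < 2 then false
    else
      -- for idx in closest_indices[:2]: early return True on hit, else False
      (PySem.List.slice closest_indices none (some (2 : Int))).any
        (fun idx => decide (|idx - target_idx| ≤ 576) || decide (|idx - target_idx| ≤ 64))

-- ===== PORT B =====
def is_within_valid_range_alt (valid_indices : List Int) (target_idx : Int) : Bool :=
  if valid_indices.length < 2 then false
  else valid_indices.any (fun idx => decide (|idx - target_idx| ≤ 576))

-- ===== PRECONDITION & SPEC =====
def Spec_is_within_valid_range (valid_indices : List Int) (target_idx : Int) (out : Bool) : Prop := out = is_within_valid_range_alt valid_indices target_idx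
instance (valid_indices : List Int) (target_idx : Int) (out : Bool) : Decidable (Spec_is_within_valid_range valid_indices target_idx out) := by unfold Spec_is_within_valid_range; infer_instance

-- ===== CLAIM (what is proved, stated in full; the proofs are below) =====
def Claim_equal_is_within_valid_range : Prop := ∀ (valid_indices : List Int) (target_idx : Int), Dom_is_within_valid_range valid_indices target_idx → Spec_is_within_valid_range valid_indices target_idx (is_within_valid_range valid_indices target_idx)

-- ===== LEMMAS AND PROOFS =====

-- the ≤64 disjunct is absorbed by ≤576
theorem pred_simp (t idx : Int) :
    (decide (|idx - t| ≤ 576) || decide (|idx - t| ≤ 64)) = decide (|idx - t| ≤ 576) := by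
  by_cases h : |idx - t| ≤ 576 <;> simp [h] <;> omega

-- on a nonempty sorted-by-distance list, testing the head (hence any prefix containing it)
-- is the same as testing the whole list
theorem head_decides (vs : List Int) (t m : Int) (rest : List Int)
    (hs : PySem.List.sorted vs (fun x => |x - t|) false = m :: rest) :
    vs.any (fun idx => decide (|idx - t| ≤ 576)) = decide (|m - t| ≤ 576) := by
  by_cases hm : |m - t| ≤ 576
  · have hmem : m ∈ vs := by
      have := PySem.List.mem_sorted (x := m) (xs := vs) (key := fun x => |x - t|) (rev := false)
      rw [hs] at this; exact this.mp (List.mem_cons_self)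
    simp [hm, List.any_eq_true]
    exact ⟨m, hmem, hm⟩
  · have hmin := PySem.List.key_head_sorted_le (xs := vs) (key := fun x => |x - t|) hs
    simp [hm, List.any_eq_false]
    intro x hx
    have := hmin x hx
    simp at this
    omega

theorem is_within_valid_range_eq (vs : List Int) (t : Int) :
    is_within_valid_range vs t = is_within_valid_range_alt vs t := by
  unfold is_within_valid_range is_within_valid_range_alt
  by_cases hnil : vs = []
  · simp [hnil]
  · simp only [hnil, if_false]
    rw [PySem.List.length_sorted]
    by_cases hlen : vs.length < 2
    · simp [hlen]
    · simp only [hlen, if_false]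
      obtain ⟨m, rest, hs⟩ : ∃ m rest, PySem.List.sorted vs (fun x => |x - t|) false = m :: rest := by
        rcases h : PySem.List.sorted vs (fun x => |x - t|) false with _ | ⟨m, rest⟩
        · exact absurd ((PySem.List.sorted_eq_nil_iff _ _ _).mp h) hnil
        · exact ⟨m, rest, rfl⟩
      rw [hs]
      have h2 : (2 : Int) = ((2 : Nat) : Int) := rfl
      rw [h2, PySem.List.slice_to_natCast]
      rw [head_decides vs t m rest hs]
      rcases rest with _ | ⟨m2, rest2⟩
      · have : vs.length = 1 := by
          have := PySem.List.length_sorted (xs := vs) (key := fun x => |x - t|) (rev := false)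
          rw [hs] at this; simpa using this.symm
        omega
      · simp only [List.take, List.any_cons, List.any_nil, pred_simp, Bool.or_false]
        by_cases hm : |m - t| ≤ 576
        · simp [hm]
        · -- m minimizes the distance, so m2 (∈ vs) is also out of range
          have hmin := PySem.List.key_head_sorted_le (xs := vs) (key := fun x => |x - t|) hs
          have hm2 : m2 ∈ vs := by
            have := PySem.List.mem_sorted (x := m2) (xs := vs) (key := fun x => |x - t|) (rev := false)
            rw [hs] at this
            exact this.mp (by simp)
          have := hmin m2 hm2
          simp at this
          simp [hm]
          omega

-- ===== VERDICT (by name: the statement is the Claim_ definition above) =====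
theorem is_within_valid_range_spec : Claim_equal_is_within_valid_range := by
  intro vs t _
  unfold Spec_is_within_valid_range
  exact is_within_valid_range_eq vs t
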